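-- pv_equiv track=rewrite | github.com/eb9862/PS | 프로그래머스/0/120835. 진료 순서 정하기/진료 순서 정하기.py | solution
-- ===== SOURCE A (Python) =====
-- def solution(emergency):
--     answer = []
--     copy = emergency[:]
--     copy.sort(reverse=True)
--     for e in emergency:
--         rank = copy.index(e) + 1
--         answer.append(rank)
--     return answer
-- ===== SOURCE B (Python) =====
-- def solution(emergency):
--     return [sum(1 for x in emergency if x > e) + 1 for e in emergency]
-- ===== Notes on version B (the rewrite author's own statement) =====
-- stated objective: simpler
-- what changed: Replaces the sorted copy + .index scan with a direct count of strictly greater scores per element (rank = 1 + #greater), no sorting and no auxiliary list.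
import Mathlib
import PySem

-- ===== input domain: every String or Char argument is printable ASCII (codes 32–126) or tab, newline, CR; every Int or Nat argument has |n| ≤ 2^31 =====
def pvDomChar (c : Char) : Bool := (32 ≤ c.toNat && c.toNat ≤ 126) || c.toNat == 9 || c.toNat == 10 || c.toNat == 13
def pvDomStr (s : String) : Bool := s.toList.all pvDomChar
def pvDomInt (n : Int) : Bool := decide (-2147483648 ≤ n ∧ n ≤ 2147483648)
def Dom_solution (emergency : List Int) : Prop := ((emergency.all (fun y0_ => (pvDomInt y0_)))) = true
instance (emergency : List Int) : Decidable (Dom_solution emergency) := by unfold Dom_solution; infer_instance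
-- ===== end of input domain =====

-- B drops the sorted copy and the .index scan: rank = 1 + count of strictly greater scores (simpler; same cost).

-- ===== PORT A =====
-- copy = emergency[:]; copy.sort(reverse=True); for e: answer.append(copy.index(e)+1)
-- copy.index(e) always succeeds (e ∈ copy), so the .getD 0 default is never used.
def solution (emergency : List Int) : List Int :=
  let copy := PySem.List.sorted emergency (fun x => x) true
  emergency.foldl (fun answer e =>
    answer ++ [((PySem.List.index? copy e).getD 0 : Int) + 1]) []

-- ===== PORT B =====
-- [sum(1 for x in emergency if x > e) + 1 for e in emergency]
def solution_alt (emergency : List Int) : List Int :=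
  emergency.map (fun e => ((emergency.countP (fun x => decide (e < x)) : Int)) + 1)

-- ===== PRECONDITION & SPEC =====
def Spec_solution (emergency : List Int) (out : List Int) : Prop := out = solution_alt emergency
instance (emergency : List Int) (out : List Int) : Decidable (Spec_solution emergency out) := by unfold Spec_solution; infer_instance

-- ===== CLAIM (what is proved, stated in full; the proofs are below) =====
def Claim_equal_solution : Prop := ∀ (emergency : List Int), Dom_solution emergency → Spec_solution emergency (solution emergency)

-- ===== LEMMAS AND PROOFS =====

-- In a descending list, the first index of a member equals the number of strictly greater elements.
theorem index?_descending_eq_countP (s : List Int) (e : Int)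
    (hp : s.Pairwise (fun a b => b ≤ a)) (he : e ∈ s) :
    PySem.List.index? s e = some (s.countP (fun x => decide (e < x))) := by
  induction s with
  | nil => cases he
  | cons x t ih =>
    rcases List.pairwise_cons.mp hp with ⟨hx, ht⟩
    by_cases hxe : x = e
    · subst hxe
      rw [PySem.List.index?_cons_self]
      have : t.countP (fun y => decide (x < y)) = 0 := by
        rw [List.countP_eq_zero]
        intro y hy
        simpa using not_lt.mpr (hx y hy)
      simp [this]
    · have he' : e ∈ t := by cases he with
        | head => exact absurd rfl hxe
        | tail _ h => exact h
      have hlt : e < x := lt_of_le_of_ne (hx e he') (Ne.symm hxe)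
      rw [PySem.List.index?_cons_of_ne t hxe, ih ht he']
      simp [hlt]

-- ===== VERDICT (by name: the statement is the Claim_ definition above) =====
theorem solution_spec : Claim_equal_solution := by
  intro emergency _
  unfold Spec_solution solution solution_alt
  rw [PySem.List.foldl_append_singleton_eq_map]
  apply List.map_congr_left
  intro e he
  have hperm : (PySem.List.sorted emergency (fun x => x) true).Perm emergency :=
    PySem.List.sorted_perm ..
  have hmem : e ∈ PySem.List.sorted emergency (fun x => x) true :=
    (PySem.List.mem_sorted ..).mpr he
  have hp : (PySem.List.sorted emergency (fun x => x) true).Pairwise (fun a b => b ≤ a) :=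
    PySem.List.sorted_pairwise_rev ..
  rw [index?_descending_eq_countP _ e hp hmem, hperm.countP_eq]
  simp
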